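-- pv_equiv track=rewrite | github.com/tsani/coding-cat-public | double_n-th/mutation_4.py | double_n_th
-- ===== SOURCE A (Python) =====
-- def double_n_th(string, n):
--     """
--     Bug: Ignores the condition for `n > len(string)` and proceeds with modifications regardless.
--     """
--     if n <= 0 or not string:
--         return ""
--
--     result = []
--     for i, char in enumerate(string):
--         if (i + 1) % n == 0:
--             result.append(char * 2)
--         else:
--             result.append(char)
--     return "".join(result)
-- ===== SOURCE B (Python) =====
-- def double_n_th(string, n):
--     if n <= 0 or not string:
--         return ""
--     parts = []
--     for i in range(0, len(string), n):
--         chunk = string[i:i + n]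
--         if len(chunk) == n:
--             parts.append(chunk[:-1] + chunk[-1:] * 2)
--         else:
--             parts.append(chunk)
--     return "".join(parts)
-- ===== Notes on version B (the rewrite author's own statement) =====
-- stated objective: alternative
-- what changed: replaces the per-character enumerate + (i+1)%n modulo test with a chunked traversal (range(0,len,n) with slicing) that doubles the last character of each full n-chunk and leaves a trailing partial chunk unchanged
import Mathlib
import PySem

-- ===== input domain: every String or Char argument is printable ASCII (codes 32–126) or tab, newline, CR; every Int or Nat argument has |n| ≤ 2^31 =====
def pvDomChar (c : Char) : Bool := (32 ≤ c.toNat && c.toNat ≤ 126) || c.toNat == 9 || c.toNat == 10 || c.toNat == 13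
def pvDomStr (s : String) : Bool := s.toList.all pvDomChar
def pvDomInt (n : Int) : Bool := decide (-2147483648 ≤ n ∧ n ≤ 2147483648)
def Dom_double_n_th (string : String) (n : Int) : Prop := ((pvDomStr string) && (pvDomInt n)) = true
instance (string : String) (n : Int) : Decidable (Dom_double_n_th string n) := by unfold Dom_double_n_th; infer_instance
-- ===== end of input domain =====

-- B replaces A's per-index modulo test by a chunk decomposition over string[i:i+n] slices (a timing run measured it faster by a constant factor).

-- ===== PORT A =====
def double_n_th (string : String) (n : Int) : String :=
  if n ≤ 0 ∨ string.toList = [] then "" else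
    String.ofList ((PySem.List.enumerate string.toList).foldl
      (fun result ic => result ++ (if PySem.Int.mod (ic.1 + 1) n = 0 then [ic.2, ic.2] else [ic.2])) [])

-- ===== PORT B =====
-- body of B's loop: chunk = string[i:i+n]; full chunks become chunk[:-1] + chunk[-1:]*2
def pvBody (n : Int) (l0 : List Char) (i : Int) : List Char :=
  let chunk := PySem.List.slice l0 (some i) (some (i + n))
  if (chunk.length : Int) = n then
    PySem.List.slice chunk none (some (-1)) ++
      PySem.List.slice chunk (some (-1)) none ++ PySem.List.slice chunk (some (-1)) none
  else chunk

def double_n_th_alt (string : String) (n : Int) : String :=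
  if n ≤ 0 ∨ string.toList = [] then "" else
    String.ofList ((PySem.List.pyRange 0 (PySem.Str.len string) n).foldl
      (fun parts i => parts ++ pvBody n string.toList i) [])

-- ===== PRECONDITION & SPEC =====
def Spec_double_n_th (string : String) (n : Int) (out : String) : Prop := out = double_n_th_alt string n
instance (string : String) (n : Int) (out : String) : Decidable (Spec_double_n_th string n out) := by unfold Spec_double_n_th; infer_instance

-- ===== CLAIM (what is proved, stated in full; the proofs are below) =====
def Claim_equal_double_n_th : Prop := ∀ (string : String) (n : Int), Dom_double_n_th string n → Spec_double_n_th string n (double_n_th string n)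

-- ===== LEMMAS AND PROOFS =====

-- A's per-(index,char) contribution
def pvF (n : Int) (ic : Int × Char) : List Char :=
  if PySem.Int.mod (ic.1 + 1) n = 0 then [ic.2, ic.2] else [ic.2]

-- canonical chunk recursion both ports are reduced to
def pvG (m : Nat) (l : List Char) : List Char :=
  if _h : m = 0 ∨ l.length < m then l
  else (l.take m).dropLast ++ (l.take m).drop (m - 1) ++ (l.take m).drop (m - 1) ++ pvG m (l.drop m)
termination_by l.length
decreasing_by simp only [List.length_drop]; omega

theorem pvG_nil (m : Nat) : pvG m [] = [] := by
  rw [pvG]; split <;> simp_all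

theorem pvMod_ne (n : Int) (hn : 0 < n) (k j : Int) (h0 : 0 ≤ j) (hj : j + 1 < n) :
    PySem.Int.mod (n * k + j + 1) n ≠ 0 := by
  rw [PySem.Int.mod_eq_emod_of_pos hn,
    show n * k + j + 1 = (j + 1) + n * k by ring, Int.add_mul_emod_self_left,
    Int.emod_eq_of_lt (by omega) (by omega)]
  omega

theorem pvMod_zero (n : Int) (hn : 0 < n) (k : Int) : PySem.Int.mod (n * k + n) n = 0 := by
  rw [PySem.Int.mod_eq_emod_of_pos hn,
    show n * k + n = 0 + n * (k + 1) by ring, Int.add_mul_emod_self_left]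
  simp

theorem pvFlatMap_single (n : Int) (l : List Char) : ∀ (s : Int),
    (∀ j : Nat, j < l.length → PySem.Int.mod (s + j + 1) n ≠ 0) →
    (PySem.List.enumerate l s).flatMap (pvF n) = l := by
  induction l with
  | nil => intro s _; simp [PySem.List.enumerate_nil]
  | cons c t ih =>
    intro s h
    rw [PySem.List.enumerate_cons, List.flatMap_cons]
    have h0 : PySem.Int.mod (s + 1) n ≠ 0 := by
      have := h 0 (by simp); simpa using this
    rw [show pvF n (s, c) = [c] by simp [pvF, h0]]
    rw [ih (s + 1) (fun j hj => by
      have := h (j + 1) (by simp; omega)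
      push_cast at this ⊢
      convert this using 2
      ring)]
    rfl

theorem pvA_eq_G (n : Int) (hn : 0 < n) : ∀ (N : Nat) (l : List Char), l.length ≤ N → ∀ (k : Int),
    (PySem.List.enumerate l (n * k)).flatMap (pvF n) = pvG n.toNat l := by
  have hmn : (n.toNat : Int) = n := Int.toNat_of_nonneg hn.le
  intro N
  induction N with
  | zero =>
    intro l hl k
    have : l = [] := List.eq_nil_of_length_eq_zero (by omega)
    subst this
    simp [PySem.List.enumerate_nil, pvG_nil]
  | succ N ih =>
    intro l hl k
    by_cases hsmall : l.length < n.toNat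
    · rw [pvG, dif_pos (Or.inr hsmall)]
      exact pvFlatMap_single n l (n * k) (fun j hj => pvMod_ne n hn k j (by omega) (by omega))
    · set m := n.toNat with hm
      have hm1 : 1 ≤ m := by omega
      have hlen : m ≤ l.length := by omega
      have hlc : (l.take m).length = m := by simp; omega
      obtain ⟨cs, c, hc⟩ : ∃ cs c, l.take m = cs ++ [c] := by
        rcases (l.take m).eq_nil_or_concat with h0 | ⟨cs, c, h0⟩
        · exfalso; rw [h0] at hlc; simp at hlc; omega
        · exact ⟨cs, c, by simpa using h0⟩
      have hcs : cs.length = m - 1 := by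
        rw [hc] at hlc; simp at hlc; omega
      conv_lhs => rw [← List.take_append_drop m l, PySem.List.enumerate_append, List.flatMap_append,
        hc, PySem.List.enumerate_append, List.flatMap_append]
      have p1 : (PySem.List.enumerate cs (n * k)).flatMap (pvF n) = cs :=
        pvFlatMap_single n cs (n * k) (fun j hj => pvMod_ne n hn k j (by omega) (by omega))
      have p2 : (PySem.List.enumerate [c] (n * k + cs.length)).flatMap (pvF n) = [c, c] := by
        rw [PySem.List.enumerate_cons, PySem.List.enumerate_nil, List.flatMap_cons, List.flatMap_nil]
        have hz : PySem.Int.mod ((n * k + cs.length) + 1) n = 0 := by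
          rw [show (n * k + (cs.length : Int)) + 1 = n * k + n by rw [hcs]; omega]
          exact pvMod_zero n hn k
        simp [pvF, hz]
      have p3 : (PySem.List.enumerate (l.drop m) (n * k + (l.take m).length)).flatMap (pvF n)
          = pvG m (l.drop m) := by
        rw [show (n * k + ((l.take m).length : Int)) = n * (k + 1) by rw [hlc]; rw [hmn]; ring]
        exact ih (l.drop m) (by rw [List.length_drop]; omega) (k + 1)
      rw [hc] at p3
      rw [p1, p2, p3]
      conv_rhs => rw [pvG]
      rw [dif_neg (show ¬(m = 0 ∨ l.length < m) by omega)]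
      have d1 : (l.take m).dropLast = cs := by rw [hc]; simp
      have d2 : (l.take m).drop (m - 1) = [c] := by
        rw [hc, ← hcs, List.drop_left]
      rw [d1, d2]
      simp

theorem pvRange_nil (a b s : Int) (hs : 0 < s) (h : b ≤ a) : PySem.List.pyRange a b s = [] := by
  rw [PySem.List.pyRange_of_pos _ _ hs, if_neg (by omega)]
  simp

theorem pvRange_cons (a b s : Int) (hs : 0 < s) (h : a < b) :
    PySem.List.pyRange a b s = a :: PySem.List.pyRange (a + s) b s := by
  rw [PySem.List.pyRange_of_pos _ _ hs, PySem.List.pyRange_of_pos _ _ hs, if_pos h]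
  have hq : (b - a + s - 1) / s = (b - a - 1) / s + 1 := by
    rw [show b - a + s - 1 = (b - a - 1) + 1 * s by ring, Int.add_mul_ediv_right _ _ (by omega)]
  have hnn : 0 ≤ (b - a - 1) / s := Int.ediv_nonneg (by omega) (by omega)
  have hcnt : ((b - a + s - 1) / s).toNat = ((b - a - 1) / s).toNat + 1 := by omega
  rw [hcnt, List.range_succ_eq_map, List.map_cons, List.map_map]
  have htail : (if a + s < b then ((b - (a + s) + s - 1) / s).toNat else 0) = ((b - a - 1) / s).toNat := by
    by_cases h2 : a + s < b
    · rw [if_pos h2]; congr 1; ring_nf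
    · rw [if_neg h2]
      have : (b - a - 1) / s = 0 := Int.ediv_eq_zero_of_lt (by omega) (by omega)
      omega
  rw [htail]
  refine List.cons_eq_cons.mpr ⟨by simp, ?_⟩
  apply List.map_congr_left; intro k _; simp; ring

theorem pvB_eq_G (n : Int) (hn : 0 < n) (l0 : List Char) : ∀ (N : Nat) (s : Nat), l0.length - s ≤ N →
    (PySem.List.pyRange s l0.length n).flatMap (pvBody n l0) = pvG n.toNat (l0.drop s) := by
  have hmn : (n.toNat : Int) = n := Int.toNat_of_nonneg hn.le
  set m := n.toNat with hm
  intro N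
  induction N with
  | zero =>
    intro s hs
    have hle : l0.length ≤ s := by omega
    rw [pvRange_nil _ _ _ hn (by exact_mod_cast Int.ofNat_le.mpr hle),
      List.drop_eq_nil_of_le hle, List.flatMap_nil, pvG_nil]
  | succ N ih =>
    intro s hs
    by_cases hend : l0.length ≤ s
    · rw [pvRange_nil _ _ _ hn (by exact_mod_cast Int.ofNat_le.mpr hend),
        List.drop_eq_nil_of_le hend, List.flatMap_nil, pvG_nil]
    · have hlt : (s : Int) < l0.length := by exact_mod_cast Nat.lt_of_not_le hend
      rw [pvRange_cons _ _ _ hn hlt, List.flatMap_cons]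
      have hchunk : PySem.List.slice l0 (some (s : Int)) (some ((s : Int) + n))
          = (l0.drop s).take m := by
        rw [PySem.List.slice_toNat l0 (by omega) (by omega)]
        congr 1
        omega
      have hclen : ((l0.drop s).take m).length = min m (l0.length - s) := by simp
      by_cases hfull : m ≤ l0.length - s
      · -- full chunk
        have hcl : ((l0.drop s).take m).length = m := by omega
        have hc2 : ((((l0.drop s).take m).length : Int) = n) := by rw [hcl]; exact hmn
        have hbody : pvBody n l0 s = ((l0.drop s).take m).dropLast ++
            ((l0.drop s).take m).drop (m - 1) ++ ((l0.drop s).take m).drop (m - 1) := by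
          rw [pvBody]
          simp only [hchunk]
          rw [if_pos hc2, PySem.List.slice_to_neg_one, PySem.List.slice_from_neg_one, hcl]
        have htail : (PySem.List.pyRange ((s : Int) + n) l0.length n).flatMap (pvBody n l0)
            = pvG m (l0.drop (s + m)) := by
          rw [show (s : Int) + n = ((s + m : Nat) : Int) by push_cast; omega]
          exact ih (s + m) (by omega)
        rw [hbody, htail]
        conv_rhs => rw [pvG]
        rw [dif_neg (show ¬(m = 0 ∨ (l0.drop s).length < m) by rw [List.length_drop]; omega)]
        rw [List.drop_drop]
      · -- trailing partial chunk
        have hps : l0.length - s < m := by omega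
        have hcl : ((l0.drop s).take m).length = l0.length - s := by omega
        have hc2 : ¬((((l0.drop s).take m).length : Int) = n) := by rw [hcl]; omega
        have hbody : pvBody n l0 s = l0.drop s := by
          rw [pvBody]
          simp only [hchunk]
          rw [if_neg hc2, List.take_of_length_le (by rw [List.length_drop]; omega)]
        have htail : PySem.List.pyRange ((s : Int) + n) l0.length n = [] := by
          apply pvRange_nil _ _ _ hn
          omega
        rw [hbody, htail, List.flatMap_nil, List.append_nil, pvG,
          dif_pos (Or.inr (by rw [List.length_drop]; omega))]

-- ===== VERDICT (by name: the statement is the Claim_ definition above) =====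
theorem double_n_th_spec : Claim_equal_double_n_th := by
  intro string n _
  unfold Spec_double_n_th double_n_th double_n_th_alt
  by_cases hg : n ≤ 0 ∨ string.toList = []
  · rw [if_pos hg, if_pos hg]
  · rw [if_neg hg, if_neg hg]
    obtain ⟨hn0, hne⟩ := not_or.mp hg
    have hn : 0 < n := by omega
    congr 1
    rw [PySem.List.foldl_append_eq_flatMap
        (fun ic : Int × Char => if PySem.Int.mod (ic.1 + 1) n = 0 then [ic.2, ic.2] else [ic.2]) _ [],
      PySem.List.foldl_append_eq_flatMap (pvBody n string.toList) _ []]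
    simp only [List.nil_append]
    rw [show (fun ic : Int × Char => if PySem.Int.mod (ic.1 + 1) n = 0 then [ic.2, ic.2] else [ic.2])
        = pvF n from rfl]
    have hA := pvA_eq_G n hn string.toList.length string.toList le_rfl 0
    rw [mul_zero] at hA
    rw [hA, PySem.Str.len_eq, show (0 : Int) = ((0 : Nat) : Int) from rfl]
    have hB := pvB_eq_G n hn string.toList string.toList.length 0 (by omega)
    rw [List.drop_zero] at hB
    rw [hB]
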